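-- pv_equiv track=rewrite | github.com/wilsonquilli/FootyForecast-Sports-Predictor | backend/api_integration.py | _extract_player_ratings
-- ===== SOURCE A (Python) =====
-- from typing import Dict, List, Optional, Tuple
--
-- def _extract_player_ratings(squad_data: Dict) -> List[float]:
--     """
--     Extract player ratings from squad data
--
--     In a real implementation, you might:
--     - Use player market values
--     - Use player performance stats
--     - Use FIFA/PES ratings
--     - Calculate custom ratings from stats
--     """
--     # Placeholder implementation
--     players = squad_data.get('squad', [])[:11]
--     ratings = []
--
--     for player in players:
--         # Example: convert market value to rating
--         # market_value = player.get('marketValue', 1000000)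
--         # rating = min(99, 50 + (market_value / 1000000) * 5)
--         rating = 75  # Default
--         ratings.append(rating)
--
--     # Ensure we have exactly 11 players
--     while len(ratings) < 11:
--         ratings.append(70)
--
--     return ratings[:11]
-- ===== SOURCE B (Python) =====
-- from typing import Dict, List
--
-- def _extract_player_ratings(squad_data: Dict) -> List[float]:
--     def fill(players, slots):
--         # one recursion over the 11 output slots, consuming players as we go
--         if slots == 0:
--             return []
--         if players:
--             return [75] + fill(players[1:], slots - 1)
--         return [70] + fill(players, slots - 1)
--     return fill(squad_data.get('squad', []), 11)
-- ===== Notes on version B (the rewrite author's own statement) =====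
-- stated objective: alternative
-- what changed: Replaces A's staged construction (slice squad to 11, append-loop of 75s, while-loop padding 70s, final slice) with a single structural recursion over the 11 output slots that emits 75 and consumes one player while players remain, else emits 70; no slicing or padding pass.
import Mathlib
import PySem

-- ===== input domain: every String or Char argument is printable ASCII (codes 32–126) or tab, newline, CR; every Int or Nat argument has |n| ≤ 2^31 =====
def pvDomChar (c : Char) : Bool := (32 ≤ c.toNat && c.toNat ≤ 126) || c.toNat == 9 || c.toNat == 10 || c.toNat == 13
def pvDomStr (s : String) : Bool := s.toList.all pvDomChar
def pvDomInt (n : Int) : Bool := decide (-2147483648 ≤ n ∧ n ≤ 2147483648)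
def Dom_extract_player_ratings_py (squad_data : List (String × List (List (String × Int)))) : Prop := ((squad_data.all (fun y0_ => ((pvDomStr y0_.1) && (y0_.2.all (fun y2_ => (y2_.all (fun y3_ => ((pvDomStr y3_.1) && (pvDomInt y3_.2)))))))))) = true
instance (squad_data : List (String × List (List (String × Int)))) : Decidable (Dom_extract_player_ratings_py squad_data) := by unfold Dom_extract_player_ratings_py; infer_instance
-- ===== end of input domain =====

-- B replaces A's slice + append-loop + while-padding + slice with one recursion over the 11 output slots (alternative decomposition).
-- ===== PORT A =====
-- while len(ratings) < 11: ratings.append(70)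
def padRatingsA (r : List Int) : List Int :=
  if r.length < 11 then padRatingsA (r ++ [70]) else r
termination_by 11 - r.length
decreasing_by simp_all; omega

def extract_player_ratings_py (squad_data : List (String × List (List (String × Int)))) : List Int :=
  let players := PySem.List.slice (PySem.Dict.getD (PySem.Dict.ofList squad_data) "squad" []) none (some 11)
  let ratings : List Int := players.foldl (fun acc _player => acc ++ [75]) []
  let ratings := padRatingsA ratings
  PySem.List.slice ratings none (some 11)

-- ===== PORT B =====
def fillRatingsB (players : List (List (String × Int))) (slots : Nat) : List Int :=
  match slots with
  | 0 => []
  | k + 1 =>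
    match players with
    | [] => 70 :: fillRatingsB [] k
    | _ :: rest => 75 :: fillRatingsB rest k

def extract_player_ratings_py_alt (squad_data : List (String × List (List (String × Int)))) : List Int :=
  fillRatingsB (PySem.Dict.getD (PySem.Dict.ofList squad_data) "squad" []) 11

-- ===== PRECONDITION & SPEC =====
def Spec_extract_player_ratings_py (squad_data : List (String × List (List (String × Int)))) (out : List Int) : Prop := out = extract_player_ratings_py_alt squad_data
instance (squad_data : List (String × List (List (String × Int)))) (out : List Int) : Decidable (Spec_extract_player_ratings_py squad_data out) := by unfold Spec_extract_player_ratings_py; infer_instance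

-- ===== CLAIM (what is proved, stated in full; the proofs are below) =====
def Claim_equal_extract_player_ratings_py : Prop := ∀ (squad_data : List (String × List (List (String × Int)))), Dom_extract_player_ratings_py squad_data → Spec_extract_player_ratings_py squad_data (extract_player_ratings_py squad_data)

-- ===== LEMMAS AND PROOFS =====

lemma foldl_append75 {α : Type} (l : List α) (init : List Int) :
    l.foldl (fun acc _ => acc ++ [(75 : Int)]) init = init ++ List.replicate l.length 75 := by
  induction l generalizing init with
  | nil => simp
  | cons x xs ih => simp [List.foldl, ih, List.replicate_succ]

lemma padRatingsA_eq (r : List Int) : padRatingsA r = r ++ List.replicate (11 - r.length) 70 := by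
  unfold padRatingsA
  split
  · rename_i h
    rw [padRatingsA_eq (r ++ [70])]
    have h1 : 11 - r.length = (11 - (r.length + 1)) + 1 := by omega
    simp [h1, List.replicate_succ]
  · rename_i h
    have : 11 - r.length = 0 := by omega
    simp [this]
termination_by 11 - r.length
decreasing_by simp_all; omega

lemma fillRatingsB_eq (players : List (List (String × Int))) (k : Nat) :
    fillRatingsB players k =
      List.replicate (min k players.length) 75 ++ List.replicate (k - players.length) 70 := by
  induction k generalizing players with
  | zero => simp [fillRatingsB]
  | succ k ih =>
    cases players with
    | nil => simp [fillRatingsB, ih, List.replicate_succ]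
    | cons p rest =>
      simp only [fillRatingsB, ih rest, List.length_cons]
      have h1 : min (k + 1) (rest.length + 1) = min k rest.length + 1 := by omega
      have h2 : k + 1 - (rest.length + 1) = k - rest.length := by omega
      simp [h1, h2, List.replicate_succ]

-- ===== VERDICT (by name: the statement is the Claim_ definition above) =====
theorem extract_player_ratings_py_spec : Claim_equal_extract_player_ratings_py := by
  intro squad_data _
  unfold Spec_extract_player_ratings_py extract_player_ratings_py extract_player_ratings_py_alt
  simp only []
  set xs := PySem.Dict.getD (PySem.Dict.ofList squad_data) "squad" ([] : List (List (String × Int))) with hxs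
  rw [PySem.List.slice_to xs (by norm_num)]
  rw [foldl_append75, padRatingsA_eq]
  simp only [List.nil_append]
  rw [fillRatingsB_eq]
  set n := (xs.take (11:Int).toNat).length with hn
  have hn' : n = min 11 xs.length := by simp [hn]
  have hn11 : n ≤ 11 := by omega
  rw [PySem.List.slice_to _ (by norm_num)]
  rw [List.take_of_length_le (by simp; omega)]
  have h2 : 11 - xs.length = 11 - n := by omega
  rw [← hn']
  simp [h2]
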